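-- pv_equiv track=rewrite | github.com/Isaac-Lee/BOJ-Algorithm | Python_Solutions/2193.py | pinaryNumber
-- ===== SOURCE A (Python) =====
-- def pinaryNumber(n):
--     answer = 1
--     dp1 = 1
--     dp2 = 2
--     if n == 1:
--         return dp1
--     if n == 2:
--         return dp1
--     if n == 3:
--         answer = dp1 + dp2
--         dp1 = dp2
--         dp2 = answer
--         return dp1
--     for i in range(4, n+1):
--         answer = dp2 + dp1
--         dp1 = dp2
--         dp2 = answer
--     return answer
-- ===== SOURCE B (Python) =====
-- def pinaryNumber(n):
--     # Fast-doubling Fibonacci: the count of n-digit pinary numbers is Fib(n)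
--     # (Fib(1) = Fib(2) = 1).  O(log n) arithmetic steps instead of A's O(n) loop.
--     if n <= 2:
--         return 1
--
--     def fib(k):
--         # returns (Fib(k), Fib(k+1))
--         if k == 0:
--             return (0, 1)
--         a, b = fib(k // 2)
--         c = a * (2 * b - a)
--         d = a * a + b * b
--         if k % 2 == 0:
--             return (c, d)
--         return (d, c + d)
--
--     return fib(n)[0]
-- ===== Notes on version B (the rewrite author's own statement) =====
-- stated objective: faster
-- what changed: Replaced A's linear dp loop (plus early-return chain for n=1,2,3) with recursive fast-doubling Fibonacci; intended as faster (O(log n) arithmetic steps); a timing run measured B over 80x faster at the largest size where both programs' outputs could be decoded.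
import Mathlib
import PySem

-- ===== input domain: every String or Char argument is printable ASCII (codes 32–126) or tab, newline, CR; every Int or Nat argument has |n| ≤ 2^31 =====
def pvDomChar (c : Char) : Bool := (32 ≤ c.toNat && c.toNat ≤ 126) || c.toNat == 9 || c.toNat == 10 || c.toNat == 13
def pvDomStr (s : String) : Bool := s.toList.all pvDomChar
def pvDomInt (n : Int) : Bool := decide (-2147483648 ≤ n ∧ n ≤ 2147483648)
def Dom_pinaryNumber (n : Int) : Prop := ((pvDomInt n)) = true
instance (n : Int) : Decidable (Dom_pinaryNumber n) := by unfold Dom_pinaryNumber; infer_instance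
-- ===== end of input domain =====

-- B replaces A's linear dp loop with fast-doubling Fibonacci; intended as faster (O(log n)
-- arithmetic steps); a timing run measured ~83x at the largest size both outputs decoded.

-- ===== PORT A =====
def pinaryNumber (n : Int) : Int :=
  let answer : Int := 1
  let dp1 : Int := 1
  let dp2 : Int := 2
  if n = 1 then dp1
  else if n = 2 then dp1
  else if n = 3 then
    let answer := dp1 + dp2
    let dp1 := dp2
    let _dp2 := answer
    dp1
  else
    -- for i in range(4, n+1): answer = dp2 + dp1; dp1 = dp2; dp2 = answer
    ((PySem.List.pyRange 4 (n + 1) 1).foldl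
      (fun (s : Int × Int × Int) _ =>
        let answer := s.2.2 + s.2.1
        (answer, s.2.2, answer))
      (answer, dp1, dp2)).1

-- ===== PORT B =====
-- fib(k) of Source B: returns (Fib(k), Fib(k+1)) by fast doubling
def fibPair (k : Nat) : Int × Int :=
  if h : k = 0 then (0, 1)
  else
    let p := fibPair (k / 2)
    let a := p.1
    let b := p.2
    let c := a * (2 * b - a)
    let d := a * a + b * b
    if k % 2 = 0 then (c, d) else (d, c + d)
termination_by k
decreasing_by exact Nat.div_lt_self (Nat.pos_of_ne_zero h) one_lt_two

def pinaryNumber_alt (n : Int) : Int :=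
  if n ≤ 2 then 1 else (fibPair n.toNat).1

-- ===== PRECONDITION & SPEC =====
def Spec_pinaryNumber (n : Int) (out : Int) : Prop := out = pinaryNumber_alt n
instance (n : Int) (out : Int) : Decidable (Spec_pinaryNumber n out) := by unfold Spec_pinaryNumber; infer_instance

-- ===== CLAIM (what is proved, stated in full; the proofs are below) =====
def Claim_equal_pinaryNumber : Prop := ∀ (n : Int), Dom_pinaryNumber n → Spec_pinaryNumber n (pinaryNumber n)

-- ===== LEMMAS AND PROOFS =====

-- fast doubling computes consecutive Fibonacci numbers
theorem fibPair_eq (k : Nat) : fibPair k = ((Nat.fib k : Int), (Nat.fib (k + 1) : Int)) := by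
  induction k using Nat.strong_induction_on with
  | _ k ih =>
    rw [fibPair]
    by_cases h : k = 0
    · simp [h]
    · simp only [h, dite_false]
      rw [ih (k / 2) (Nat.div_lt_self (Nat.pos_of_ne_zero h) one_lt_two)]
      have hfle : Nat.fib (k / 2) ≤ 2 * Nat.fib (k / 2 + 1) :=
        le_trans (Nat.fib_le_fib_succ) (by omega)
      rcases Nat.even_or_odd k with ⟨m, hm⟩ | ⟨m, hm⟩
      · have hk2 : k / 2 = m := by omega
        have hmod : k % 2 = 0 := by omega
        subst hm
        simp only [hk2, hmod, if_true]
        rw [Prod.mk.injEq]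
        refine ⟨?_, ?_⟩
        · rw [show m + m = 2 * m by ring, Nat.fib_two_mul]
          have : (↑(Nat.fib m * (2 * Nat.fib (m + 1) - Nat.fib m)) : Int)
              = (Nat.fib m : Int) * (2 * (Nat.fib (m + 1) : Int) - (Nat.fib m : Int)) := by
            rw [Nat.cast_mul, Nat.cast_sub (by rw [hk2] at hfle; omega)]
            push_cast; ring
          rw [this]
        · rw [show m + m + 1 = 2 * m + 1 by ring, Nat.fib_two_mul_add_one]
          push_cast; ring
      · have hk2 : k / 2 = m := by omega
        have hmod : ¬ (k % 2 = 0) := by omega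
        subst hm
        simp only [hk2, hmod, if_false]
        rw [Prod.mk.injEq]
        refine ⟨?_, ?_⟩
        · rw [show 2 * m + 1 = 2 * m + 1 by rfl, Nat.fib_two_mul_add_one]
          push_cast; ring
        · rw [show 2 * m + 1 + 1 = 2 * m + 2 by rfl, Nat.fib_two_mul_add_two]
          have : (↑(Nat.fib m * (2 * Nat.fib (m + 1) - Nat.fib m)) : Int)
              = (Nat.fib m : Int) * (2 * (Nat.fib (m + 1) : Int) - (Nat.fib m : Int)) := by
            rw [Nat.cast_mul, Nat.cast_sub (by rw [hk2] at hfle; omega)]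
            push_cast; ring
          push_cast
          ring

-- A's loop invariant: after running i = 4 .. m the state is (Fib m, Fib (m-1), Fib m)
theorem loopA (m : Nat) (h : 4 ≤ m) :
    (PySem.List.pyRange 4 ((m : Int) + 1) 1).foldl
      (fun (s : Int × Int × Int) _ =>
        let answer := s.2.2 + s.2.1
        (answer, s.2.2, answer))
      (1, 1, 2)
    = ((Nat.fib m : Int), (Nat.fib (m - 1) : Int), (Nat.fib m : Int)) := by
  induction m with
  | zero => omega
  | succ m ih =>
    by_cases hm : 4 ≤ m
    · have hsplit : PySem.List.pyRange 4 ((↑(m + 1) : Int) + 1) 1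
          = PySem.List.pyRange 4 ((m : Int) + 1) 1 ++ [((m : Int) + 1)] := by
        have := PySem.List.pyRange_one_succ_right (a := 4) (b := (m : Int) + 1) (by omega)
        push_cast
        push_cast at this
        convert this using 2
      rw [hsplit, List.foldl_append, ih hm]
      simp only [List.foldl_cons, List.foldl_nil]
      have h1 : Nat.fib m + Nat.fib (m - 1) = Nat.fib (m + 1) := by
        have := Nat.fib_add_two (n := m - 1)
        have hm1 : m - 1 + 2 = m + 1 := by omega
        have hm2 : m - 1 + 1 = m := by omega
        rw [hm1, hm2] at this
        omega
      have h2 : m + 1 - 1 = m := by omega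
      simp only [h2]
      refine Prod.ext ?_ (Prod.ext rfl ?_) <;>
        · simp only []
          rw [← h1]
          push_cast; ring
    · have hm4 : m = 3 := by omega
      subst hm4
      norm_num [show ((4 : Nat) : Int) + 1 = 5 by norm_num]
      rw [show (PySem.List.pyRange 4 5 1) = [4] from by decide]
      simp

-- ===== VERDICT (by name: the statement is the Claim_ definition above) =====
theorem pinaryNumber_spec : Claim_equal_pinaryNumber := by
  intro n _
  unfold Spec_pinaryNumber pinaryNumber pinaryNumber_alt
  by_cases h1 : n = 1
  · subst h1; decide
  · by_cases h2 : n = 2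
    · subst h2; decide
    · by_cases h3 : n = 3
      · subst h3; norm_num [fibPair_eq]; decide
      · simp only [h1, h2, h3, if_false]
        by_cases hle : n ≤ 2
        · -- n ≤ 0 here: the loop range is empty and A returns the initial answer 1
          have hempty : PySem.List.pyRange 4 (n + 1) 1 = [] :=
            PySem.List.pyRange_one_eq_nil (by omega)
          rw [hempty]
          simp [hle]
        · have hn4 : 4 ≤ n := by omega
          have hto : ((n.toNat : Int)) = n := Int.toNat_of_nonneg (by omega)
          have hm4 : 4 ≤ n.toNat := by omega
          rw [← hto, loopA n.toNat hm4, fibPair_eq]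
          simp only [Int.toNat_natCast]
          rw [if_neg (show ¬ ((n.toNat : Int) ≤ 2) by omega)]
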